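-- pv_equiv track=rewrite | github.com/Kotop3ska/Fifteen_game_3x3 | all_methods.py | Appritiation
-- ===== SOURCE A (Python) =====
-- def Appritiation(sit):
--     """Функция, возвращающая ситуации по их оценке"""
--     temp = []   # список сгенерированных ситуаций
--     max_items = []  # список оценок для каждой ситуации
--     for i in range(1, 5):
--         next = NextSit(sit, i)  # генерируем новую ситуацию
--         if next:
--             temp.append(next)
--             max_items.append(Grade(next))
--     situations = [] # список ситуаций, отсортированных по их оцененному значеннию
--     for i in range(len(max_items)):
--         max_index = max_items.index(max(max_items)) # индекс ситуации с данной оценкой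
--         situations.append(temp[max_index])
--         max_items.remove(max(max_items))
--         temp.pop(max_index)
--     return situations
--
-- def NextSit(sit, number):
--     row, col = FindZero(sit)
--     directions = {
--         1: (row - 1, col),  # Вверх
--         2: (row + 1, col),  # Вниз
--         3: (row, col - 1),  # Влево
--         4: (row, col + 1),  # Вправо
--     }
--     new_row, new_col = directions[number]
--     if 0 <= new_row < 3 and 0 <= new_col < 3:  # проверка на возможность генерации ситуации с данным номером хода
--         new_sit = [row[:] for row in sit]  # Копируем массив
--         # Меняем местами пустую ячейку с целевой
--         new_sit[row][col], new_sit[new_row][new_col] = new_sit[new_row][new_col], new_sit[row][col]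
--         return new_sit
--     return False
--
-- def FindZero(sit):
--     for i in range(3):
--         for j in range(3):
--             if sit[i][j] == 0:
--                 return i, j
--     return None
--
-- def Grade(sit):
--     situation = [sit[i][j] for i in range(len(sit)) for j in range(len(sit))]
--     grade = 0
--     # Просчет манхэтенского расстояния для каждой ячейки
--     for i in range(len(situation)):
--         if situation[i] != 0:
--             grade += abs((i // 3 + 1) - ((situation[i] - 1) // 3 + 1)) + abs((i % 3) - ((situation[i] - 1) % 3))
--     # Возвращает оценку для ситуации
--     return grade
-- ===== SOURCE B (Python) =====
-- def Appritiation(sit):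
--     """Neighbor situations ordered by Manhattan grade, best (highest) first.
--
--     Self-contained: finds the blank by one flat scan, generates each legal
--     neighbor directly from the four deltas, and keeps the result list ordered
--     by inserting every new board behind all boards with a >= grade (a stable
--     descending insertion), instead of A's generate-then-repeated-max selection.
--     """
--     k = next(k for k in range(9) if sit[k // 3][k % 3] == 0)
--     zi, zj = k // 3, k % 3
--     ranked = []  # (grade, board), kept in descending grade order, stable
--     for di, dj in ((-1, 0), (1, 0), (0, -1), (0, 1)):
--         ni, nj = zi + di, zj + dj
--         if 0 <= ni < 3 and 0 <= nj < 3: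
--             board = [row[:] for row in sit]
--             board[zi][zj], board[ni][nj] = board[ni][nj], board[zi][zj]
--             g = manhattan(board)
--             pos = 0
--             while pos < len(ranked) and ranked[pos][0] >= g:
--                 pos += 1
--             ranked.insert(pos, (g, board))
--     return [board for _, board in ranked]
--
-- def manhattan(board):
--     n = len(board)
--     g = 0
--     for i in range(n):
--         for j in range(n):
--             v = board[i][j]
--             if v != 0:
--                 k = i * n + j
--                 g += abs(k // 3 - (v - 1) // 3) + abs(k % 3 - (v - 1) % 3)
--     return g
-- ===== Notes on version B (the rewrite author's own statement) =====
-- stated objective: alternative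
-- what changed: B is self-contained and algorithmically different end to end: it finds the blank by one flat 0..8 scan (no FindZero), generates each legal neighbor directly from the four coordinate deltas (no NextSit/move-number dictionary), computes the Manhattan grade by a direct double loop over cells (no flattened intermediate list), and keeps the output ordered by stable descending insertion of each board as it is generated, instead of A's collect-everything-then-repeated-max/index/remove/pop selection loop.
import Mathlib
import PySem

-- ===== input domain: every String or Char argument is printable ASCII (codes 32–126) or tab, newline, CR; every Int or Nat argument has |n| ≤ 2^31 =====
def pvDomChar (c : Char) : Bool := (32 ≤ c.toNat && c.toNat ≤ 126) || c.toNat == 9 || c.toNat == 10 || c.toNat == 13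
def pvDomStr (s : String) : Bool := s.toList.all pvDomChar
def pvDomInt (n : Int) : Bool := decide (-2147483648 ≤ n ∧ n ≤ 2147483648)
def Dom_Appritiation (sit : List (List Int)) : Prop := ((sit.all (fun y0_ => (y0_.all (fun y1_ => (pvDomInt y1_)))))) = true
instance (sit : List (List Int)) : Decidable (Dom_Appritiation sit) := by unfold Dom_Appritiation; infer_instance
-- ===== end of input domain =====

-- B is self-contained and different end to end: one flat scan for the blank, direct delta-based
-- neighbor generation, a direct double-loop Manhattan grade, and a stable descending insertion of
-- each board as it is generated, instead of A's FindZero/NextSit/Grade plus repeated-max selection.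

-- ===== PORT A =====
-- sit[i][j] (defaults only reachable outside Pre_, where Python raises)
def pvCell (sit : List (List Int)) (i j : Int) : Int :=
  PySem.List.pyGetD (PySem.List.pyGetD sit i []) j 0

-- FindZero: first (i, j) in the row-major 3x3 scan with sit[i][j] == 0; None if absent
def FindZero (sit : List (List Int)) : Option (Int × Int) :=
  List.find? (fun p => pvCell sit p.1 p.2 == 0)
    ((PySem.List.pyRange 0 3 1).flatMap (fun i => (PySem.List.pyRange 0 3 1).map (fun j => (i, j))))

-- new_sit[i][j] = v (indices are in [0,3) whenever Python does not raise)
def pvSetCell (sit : List (List Int)) (i j v : Int) : List (List Int) :=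
  sit.set i.toNat ((PySem.List.pyGetD sit i []).set j.toNat v)

-- NextSit: 'False' is modelled as none (the caller only tests truthiness); none also where Python raises
def NextSit (sit : List (List Int)) (number : Int) : Option (List (List Int)) :=
  match FindZero sit with
  | none => none   -- Python raises TypeError here (outside Pre_)
  | some (row, col) =>
    let directions : PySem.Dict Int (Int × Int) :=
      PySem.Dict.mk [(1, (row - 1, col)), (2, (row + 1, col)), (3, (row, col - 1)), (4, (row, col + 1))]
    match PySem.Dict.get? directions number with
    | none => none   -- KeyError (unreachable from Appritiation)
    | some (newRow, newCol) =>
      if 0 ≤ newRow ∧ newRow < 3 ∧ 0 ≤ newCol ∧ newCol < 3 then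
        -- a, b = new_sit[new_row][new_col], new_sit[row][col]; assign [row][col] first, then [new_row][new_col]
        let a := pvCell sit newRow newCol
        let b := pvCell sit row col
        some (pvSetCell (pvSetCell sit row col a) newRow newCol b)
      else none

def Grade (sit : List (List Int)) : Int :=
  let n : Int := (sit.length : Int)
  let situation :=
    (PySem.List.pyRange 0 n 1).flatMap (fun i => (PySem.List.pyRange 0 n 1).map (fun j => pvCell sit i j))
  (PySem.List.pyRange 0 (situation.length : Int) 1).foldl (fun grade i =>
    let v := PySem.List.pyGetD situation i 0
    if v ≠ 0 then
      grade + |PySem.Int.floordiv i 3 + 1 - (PySem.Int.floordiv (v - 1) 3 + 1)|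
            + |PySem.Int.mod i 3 - PySem.Int.mod (v - 1) 3|
    else grade) 0

-- the second loop of A: repeatedly take the first maximal grade, move the matching situation across
def selLoop : Nat → List (List (List Int)) → List Int → List (List (List Int)) → List (List (List Int))
  | 0, _, _, situations => situations
  | k + 1, temp, maxItems, situations =>
    match PySem.List.max? maxItems (fun x => x) with
    | none => situations   -- max([]): ValueError (unreachable: the loop runs len(maxItems) times)
    | some m =>
      match PySem.List.index? maxItems m with
      | none => situations   -- unreachable: m ∈ maxItems
      | some maxIndex =>
        let s := PySem.List.pyGetD temp (maxIndex : Int) []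
        let maxItems' := match PySem.List.remove? maxItems m with | some l => l | none => maxItems
        let temp' := match PySem.List.pop? temp (maxIndex : Int) with | some r => r.2 | none => temp
        selLoop k temp' maxItems' (situations ++ [s])

def Appritiation (sit : List (List Int)) : List (List (List Int)) :=
  let tm := (PySem.List.pyRange 1 5 1).foldl
    (fun (acc : List (List (List Int)) × List Int) i =>
      match NextSit sit i with
      | some nxt => (acc.1 ++ [nxt], acc.2 ++ [Grade nxt])
      | none => acc) ([], [])
  selLoop tm.2.length tm.1 tm.2 []

-- ===== PORT B =====
-- board[i][j] reads/writes of Source B are exact via Nat getD/set: every index B uses is a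
-- nonnegative in-range Nat wherever the Python does not raise (i.e. under Pre_).
-- manhattan: direct double loop over the cells, flat index k = i*n + j
def manhattan (board : List (List Int)) : Int :=
  let n := board.length
  (List.range n).foldl (fun g i =>
    (List.range n).foldl (fun g j =>
      let v := (board.getD i []).getD j 0
      if v ≠ 0 then
        let k := i * n + j
        g + |((k / 3 : Nat) : Int) - PySem.Int.floordiv (v - 1) 3|
          + |((k % 3 : Nat) : Int) - PySem.Int.mod (v - 1) 3|
      else g) g) 0

-- board[i][j] = v
def setCell2 (b : List (List Int)) (i j : Nat) (v : Int) : List (List Int) :=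
  b.set i ((b.getD i []).set j v)

-- ranked.insert(pos, (g, b)) with pos = first position whose grade is < g (the while loop)
def insertRanked (g : Int) (b : List (List Int)) :
    List (Int × List (List Int)) → List (Int × List (List Int))
  | [] => [(g, b)]
  | q :: t => if q.1 ≥ g then q :: insertRanked g b t else (g, b) :: q :: t

-- next(k for k in range(9) if sit[k // 3][k % 3] == 0)
def zeroIdx (sit : List (List Int)) : Option Nat :=
  (List.range 9).find? (fun k => (sit.getD (k / 3) []).getD (k % 3) 0 == 0)

def Appritiation_alt (sit : List (List Int)) : List (List (List Int)) :=
  match zeroIdx sit with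
  | none => []   -- next(...) raises StopIteration here (outside Pre_)
  | some k =>
    let zi := k / 3
    let zj := k % 3
    let ranked := [((-1 : Int), (0 : Int)), (1, 0), (0, -1), (0, 1)].foldl
      (fun ranked d =>
        let ni := (zi : Int) + d.1
        let nj := (zj : Int) + d.2
        if 0 ≤ ni ∧ ni < 3 ∧ 0 ≤ nj ∧ nj < 3 then
          let board := setCell2 (setCell2 sit zi zj ((sit.getD ni.toNat []).getD nj.toNat 0))
            ni.toNat nj.toNat ((sit.getD zi []).getD zj 0)
          insertRanked (manhattan board) board ranked
        else ranked) []
    ranked.map (·.2)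

-- ===== PRECONDITION & SPEC =====
-- Pre_ is the natural domain of the 3x3 game: at least 3 rows, every row at least as long as the
-- column count Grade scans (= the row count), and a 0 inside the 3x3 window FindZero searches.
-- Outside it A raises (IndexError / TypeError) except for a few degenerate sub-3x3 shapes, which
-- lie outside the game's domain and are excluded with it.
def Pre_Appritiation (sit : List (List Int)) : Prop :=
  3 ≤ sit.length ∧ (∀ row ∈ sit, sit.length ≤ row.length) ∧
    ((sit.take 3).any (fun r => (r.take 3).any (fun v => v == 0)) = true)
instance (sit : List (List Int)) : Decidable (Pre_Appritiation sit) := by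
  unfold Pre_Appritiation; infer_instance

def pvWitness_Appritiation : List (List Int) := [[1, 2, 3], [4, 0, 6], [7, 8, 5]]

def Spec_Appritiation (sit : List (List Int)) (out : List (List (List Int))) : Prop :=
  out = Appritiation_alt sit
instance (sit : List (List Int)) (out : List (List (List Int))) : Decidable (Spec_Appritiation sit out) := by
  unfold Spec_Appritiation; infer_instance

-- ===== CLAIM (what is proved, stated in full; the proofs are below) =====
def Claim_equal_Appritiation : Prop :=
  ∀ (sit : List (List Int)), Dom_Appritiation sit → Pre_Appritiation sit →
    Spec_Appritiation sit (Appritiation sit)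

-- ===== LEMMAS AND PROOFS =====

-- ---- the per-cell Manhattan contribution both grading loops sum up ----
def contrib (k : Nat) (v : Int) : Int :=
  if v ≠ 0 then |((k / 3 : Nat) : Int) - PySem.Int.floordiv (v - 1) 3|
              + |((k % 3 : Nat) : Int) - PySem.Int.mod (v - 1) 3| else 0

def rowSums : List (List Int) → Nat → Int
  | [], _ => 0
  | r :: rs, off => ((List.range r.length).map (fun j => contrib (off + j) (r.getD j 0))).sum
      + rowSums rs (off + r.length)

theorem sum_flatten (rows : List (List Int)) : ∀ (off : Nat),
    ((List.range rows.flatten.length).map (fun k => contrib (off + k) (rows.flatten.getD k 0))).sum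
      = rowSums rows off := by
  induction rows with
  | nil => intro off; simp [rowSums]
  | cons r rs ih =>
    intro off
    simp only [List.flatten_cons, List.length_append, List.range_add, List.map_append,
      List.sum_append, rowSums]
    congr 1
    · apply congrArg List.sum
      apply List.map_congr_left
      intro k hk
      rw [List.getD_append _ _ _ k (by simpa using List.mem_range.mp hk)]
    · rw [List.map_map, ← ih (off + r.length)]
      apply congrArg List.sum
      apply List.map_congr_left
      intro k _
      simp only [Function.comp]
      rw [List.getD_append_right _ _ _ _ (Nat.le_add_right _ _), Nat.add_sub_cancel_left]
      congr 1
      omega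

theorem rowSums_range' (cellv : Nat → Nat → Int) (n : Nat) : ∀ (m a : Nat),
    rowSums ((List.range' a m).map (fun i => (List.range n).map (cellv i))) (a * n)
      = ((List.range' a m).map (fun i =>
          ((List.range n).map (fun j => contrib (i * n + j) (cellv i j))).sum)).sum := by
  intro m
  induction m with
  | zero => intro a; simp [rowSums]
  | succ m ih =>
    intro a
    rw [List.range'_succ]
    simp only [List.map_cons, rowSums, List.sum_cons, List.length_map, List.length_range]
    congr 1
    · apply congrArg List.sum
      apply List.map_congr_left
      intro j hj
      have hj' : j < n := List.mem_range.mp hj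
      rw [List.getD_eq_getElem _ _ (by simpa using hj'), List.getElem_map, List.getElem_range]
    · have h1 : a * n + n = (a + 1) * n := by ring
      rw [h1, ih (a + 1)]

theorem Grade_eq_manhattan (bd : List (List Int)) : Grade bd = manhattan bd := by
  have hfd : ∀ k : Nat, PySem.Int.floordiv (↑k) 3 = ((k / 3 : Nat) : Int) := fun k => by
    exact_mod_cast PySem.Int.floordiv_natCast k 3
  have hmd : ∀ k : Nat, PySem.Int.mod (↑k) 3 = ((k % 3 : Nat) : Int) := fun k => by
    exact_mod_cast PySem.Int.mod_natCast k 3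
  have hsit : (PySem.List.pyRange 0 ((bd.length : Int)) 1).flatMap
      (fun i => (PySem.List.pyRange 0 ((bd.length : Int)) 1).map (fun j => pvCell bd i j))
      = ((List.range bd.length).map (fun i => (List.range bd.length).map
          (fun j => (bd.getD i []).getD j 0))).flatten := by
    rw [PySem.List.pyRange_zero_natCast, List.flatMap_map, List.flatMap_def]
    congr 1
    apply List.map_congr_left
    intro i _
    rw [List.map_map]
    apply List.map_congr_left
    intro j _
    simp [pvCell, PySem.List.pyGetD_natCast]
  simp only [Grade, manhattan, hsit]
  set rows := ((List.range bd.length).map (fun i => (List.range bd.length).map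
      (fun j => (bd.getD i []).getD j 0))) with hrows
  -- A side: index loop over the flattened list = rowSums rows 0
  rw [PySem.List.pyRange_zero_natCast, List.foldl_map]
  rw [PySem.List.foldl_congr_mem' _ _
    (fun g k => g + contrib k (rows.flatten.getD k 0)) _ ?_]
  · rw [PySem.List.foldl_add, zero_add]
    rw [List.map_congr_left (g := fun k => contrib (0 + k) (rows.flatten.getD k 0))
      (fun k _ => by simp)]
    rw [sum_flatten rows 0]
    -- B side: nested loops = the nested sum = rowSums rows 0
    have hinner : ∀ (i : Nat) (g : Int),
        (List.range bd.length).foldl (fun g j =>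
          if ((bd.getD i []).getD j 0) ≠ 0 then
            g + |(((i * bd.length + j) / 3 : Nat) : Int) - PySem.Int.floordiv (((bd.getD i []).getD j 0) - 1) 3|
              + |(((i * bd.length + j) % 3 : Nat) : Int) - PySem.Int.mod (((bd.getD i []).getD j 0) - 1) 3|
          else g) g
        = g + ((List.range bd.length).map
            (fun j => contrib (i * bd.length + j) ((bd.getD i []).getD j 0))).sum := by
      intro i g
      rw [PySem.List.foldl_congr_mem' _ _
        (fun g j => g + contrib (i * bd.length + j) ((bd.getD i []).getD j 0)) _ ?_]
      · rw [PySem.List.foldl_add]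
      · intro j _ g
        simp only [contrib]
        split_ifs with h
        · ring
        · simp
    rw [PySem.List.foldl_congr_mem' _ _
      (fun g i => g + ((List.range bd.length).map
        (fun j => contrib (i * bd.length + j) ((bd.getD i []).getD j 0))).sum) _
      (fun i _ g => hinner i g)]
    rw [PySem.List.foldl_add, zero_add]
    have h := rowSums_range' (fun i j => (bd.getD i []).getD j 0) bd.length bd.length 0
    rw [Nat.zero_mul, ← List.range_eq_range'] at h
    rw [hrows]
    exact h
  · intro k _ g
    simp only [PySem.List.pyGetD_natCast, contrib, hfd, hmd]
    split_ifs with h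
    · have habs : ∀ a x : Int, |a + 1 - (x + 1)| = |a - x| := fun a x => by
        rw [show a + 1 - (x + 1) = a - x from by ring]
      rw [habs]
      ring
    · simp
theorem pvCell_eq (s : List (List Int)) {i j : Int} (hi : 0 ≤ i) (hj : 0 ≤ j) :
    pvCell s i j = (s.getD i.toNat []).getD j.toNat 0 := by
  rw [pvCell, PySem.List.pyGetD_of_nonneg _ _ hi, PySem.List.pyGetD_of_nonneg _ _ hj]

theorem pvSetCell_eq (s : List (List Int)) {i : Int} (j v : Int) (hi : 0 ≤ i) :
    pvSetCell s i j v = setCell2 s i.toNat j.toNat v := by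
  rw [pvSetCell, setCell2, PySem.List.pyGetD_of_nonneg _ _ hi]

theorem FindZero_eq (sit : List (List Int)) :
    FindZero sit
      = (zeroIdx sit).map (fun k => (((k / 3 : Nat) : Int), ((k % 3 : Nat) : Int))) := by
  have hlist : (PySem.List.pyRange 0 3 1).flatMap
        (fun i => (PySem.List.pyRange 0 3 1).map (fun j => ((i : Int), (j : Int))))
      = (List.range 9).map (fun t => (((t / 3 : Nat) : Int), ((t % 3 : Nat) : Int))) := by decide
  rw [FindZero, hlist, List.find?_map, zeroIdx]
  have hp : ((fun p : Int × Int => pvCell sit p.1 p.2 == 0) ∘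
        (fun t : Nat => (((t / 3 : Nat) : Int), ((t % 3 : Nat) : Int))))
      = (fun k : Nat => (sit.getD (k / 3) []).getD (k % 3) 0 == 0) := by
    funext t
    simp only [Function.comp_apply, pvCell, PySem.List.pyGetD_natCast]
  rw [hp]

theorem zeroIdx_isSome (sit : List (List Int)) (h3 : 3 ≤ sit.length)
    (hz : (sit.take 3).any (fun r => (r.take 3).any (fun v => v == 0)) = true) :
    (zeroIdx sit).isSome := by
  rw [zeroIdx, List.find?_isSome]
  rw [List.any_eq_true] at hz
  obtain ⟨r, hr, hv⟩ := hz
  rw [List.any_eq_true] at hv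
  obtain ⟨v, hvmem, hv0⟩ := hv
  obtain ⟨i, hi, hri⟩ := List.getElem_of_mem hr
  obtain ⟨j, hj, hvj⟩ := List.getElem_of_mem hvmem
  have hi3 : i < 3 := by
    have := hi; simp [List.length_take] at this; omega
  have hj3 : j < 3 := by
    have := hj; simp [List.length_take] at this; omega
  have hilen : i < sit.length := by omega
  have hjlen : j < r.length := by
    have := hj; simp [List.length_take] at this; omega
  refine ⟨i * 3 + j, List.mem_range.mpr (by omega), ?_⟩
  have hdiv : (i * 3 + j) / 3 = i := by omega
  have hmod : (i * 3 + j) % 3 = j := by omega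
  rw [hdiv, hmod]
  rw [List.getD_eq_getElem _ _ hilen]
  have hsi : sit[i] = r := by
    rw [← hri, List.getElem_take]
  rw [hsi, List.getD_eq_getElem _ _ hjlen]
  have hrj : r[j] = v := by
    rw [← hvj, List.getElem_take]
  rw [hrj]
  simpa using hv0

theorem NextSit_move (sit : List (List Int)) (zi zj : Nat)
    (hFZ : FindZero sit = some ((zi : Int), (zj : Int))) (di dj m : Int)
    (hm : PySem.Dict.get? (PySem.Dict.mk
        [((1 : Int), ((zi : Int) - 1, (zj : Int))), (2, ((zi : Int) + 1, (zj : Int))),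
         (3, ((zi : Int), (zj : Int) - 1)), (4, ((zi : Int), (zj : Int) + 1))]) m
      = some ((zi : Int) + di, (zj : Int) + dj)) :
    NextSit sit m =
      (if 0 ≤ (zi : Int) + di ∧ (zi : Int) + di < 3 ∧ 0 ≤ (zj : Int) + dj ∧ (zj : Int) + dj < 3 then
        some (setCell2 (setCell2 sit zi zj ((sit.getD ((zi : Int) + di).toNat []).getD ((zj : Int) + dj).toNat 0))
          ((zi : Int) + di).toNat ((zj : Int) + dj).toNat ((sit.getD zi []).getD zj 0))
      else none) := by
  simp only [NextSit, hFZ, hm]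
  split_ifs with h
  · obtain ⟨h1, _, h3, _⟩ := h
    congr 1
    rw [pvCell_eq _ h1 h3, pvCell_eq _ (Int.natCast_nonneg zi) (Int.natCast_nonneg zj),
      pvSetCell_eq _ _ _ h1, pvSetCell_eq _ _ _ (Int.natCast_nonneg zi)]
    simp
  · rfl
theorem dict_move1 (zi zj : Nat) :
    PySem.Dict.get? (PySem.Dict.mk
        [((1 : Int), ((zi : Int) - 1, (zj : Int))), (2, ((zi : Int) + 1, (zj : Int))),
         (3, ((zi : Int), (zj : Int) - 1)), (4, ((zi : Int), (zj : Int) + 1))]) 1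
      = some ((zi : Int) + (-1), (zj : Int) + 0) := by
  have h : PySem.Dict.get? (PySem.Dict.mk
        [((1 : Int), ((zi : Int) - 1, (zj : Int))), (2, ((zi : Int) + 1, (zj : Int))),
         (3, ((zi : Int), (zj : Int) - 1)), (4, ((zi : Int), (zj : Int) + 1))]) 1
      = some ((zi : Int) - 1, (zj : Int)) := rfl
  rw [h]
  exact congrArg some (Prod.ext (by ring) (by ring))
theorem dict_move2 (zi zj : Nat) :
    PySem.Dict.get? (PySem.Dict.mk
        [((1 : Int), ((zi : Int) - 1, (zj : Int))), (2, ((zi : Int) + 1, (zj : Int))),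
         (3, ((zi : Int), (zj : Int) - 1)), (4, ((zi : Int), (zj : Int) + 1))]) 2
      = some ((zi : Int) + 1, (zj : Int) + 0) := by
  have h : PySem.Dict.get? (PySem.Dict.mk
        [((1 : Int), ((zi : Int) - 1, (zj : Int))), (2, ((zi : Int) + 1, (zj : Int))),
         (3, ((zi : Int), (zj : Int) - 1)), (4, ((zi : Int), (zj : Int) + 1))]) 2
      = some ((zi : Int) + 1, (zj : Int)) := rfl
  rw [h]
  exact congrArg some (Prod.ext (by ring) (by ring))

theorem dict_move3 (zi zj : Nat) :
    PySem.Dict.get? (PySem.Dict.mk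
        [((1 : Int), ((zi : Int) - 1, (zj : Int))), (2, ((zi : Int) + 1, (zj : Int))),
         (3, ((zi : Int), (zj : Int) - 1)), (4, ((zi : Int), (zj : Int) + 1))]) 3
      = some ((zi : Int) + 0, (zj : Int) + (-1)) := by
  have h : PySem.Dict.get? (PySem.Dict.mk
        [((1 : Int), ((zi : Int) - 1, (zj : Int))), (2, ((zi : Int) + 1, (zj : Int))),
         (3, ((zi : Int), (zj : Int) - 1)), (4, ((zi : Int), (zj : Int) + 1))]) 3
      = some ((zi : Int), (zj : Int) - 1) := rfl
  rw [h]
  exact congrArg some (Prod.ext (by ring) (by ring))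

theorem dict_move4 (zi zj : Nat) :
    PySem.Dict.get? (PySem.Dict.mk
        [((1 : Int), ((zi : Int) - 1, (zj : Int))), (2, ((zi : Int) + 1, (zj : Int))),
         (3, ((zi : Int), (zj : Int) - 1)), (4, ((zi : Int), (zj : Int) + 1))]) 4
      = some ((zi : Int) + 0, (zj : Int) + 1) := by
  have h : PySem.Dict.get? (PySem.Dict.mk
        [((1 : Int), ((zi : Int) - 1, (zj : Int))), (2, ((zi : Int) + 1, (zj : Int))),
         (3, ((zi : Int), (zj : Int) - 1)), (4, ((zi : Int), (zj : Int) + 1))]) 4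
      = some ((zi : Int), (zj : Int) + 1) := rfl
  rw [h]
  exact congrArg some (Prod.ext (by ring) (by ring))

-- ---- first argmax of a list of grades: (position, value) of the first maximal element ----
def fam : List Int → Option (Nat × Int)
  | [] => none
  | x :: t =>
    match fam t with
    | none => some (0, x)
    | some (p, m) => if x < m then some (p + 1, m) else some (0, x)

-- the selection order as index extraction: repeatedly the first index with maximal f-value
def idxExt (f : Int → Int) : Nat → List Int → List Int
  | 0, _ => []
  | k + 1, rem =>
    match fam (rem.map f) with
    | none => []
    | some (p, _) => rem.getD p 0 :: idxExt f k (rem.eraseIdx p)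

theorem fam_eq_none_iff (gs : List Int) : fam gs = none ↔ gs = [] := by
  cases gs with
  | nil => simp [fam]
  | cons x t =>
    simp only [fam]
    rcases h : fam t with _ | ⟨p, m⟩ <;> simp only [] <;> [simp; split <;> simp]

theorem foldl_max_eq_fam (t : List Int) : ∀ x : Int,
    t.foldl max x = match fam t with | none => x | some (_, m) => max x m := by
  induction t with
  | nil => intro x; rfl
  | cons z s ih =>
    intro x
    rw [List.foldl_cons, ih (max x z)]
    simp only [fam]
    rcases h : fam s with _ | ⟨q, m⟩
    · rfl
    · by_cases hzm : z < m <;> simp [hzm]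
      · congr 1
        exact max_eq_right (le_of_lt hzm)
      · congr 1
        exact max_eq_left (by omega)

theorem max?_eq_fam (gs : List Int) :
    PySem.List.max? gs (fun x => x) = (fam gs).map (·.2) := by
  cases gs with
  | nil => rfl
  | cons x t =>
    rw [PySem.List.max?_id_cons, foldl_max_eq_fam t x]
    simp only [fam]
    rcases h : fam t with _ | ⟨p, m⟩
    · rfl
    · by_cases hxm : x < m <;> simp [hxm] <;> omega

theorem fam_index? (gs : List Int) : ∀ (p : Nat) (m : Int), fam gs = some (p, m) →
    PySem.List.index? gs m = some p := by
  induction gs with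
  | nil => intro p m h; simp [fam] at h
  | cons x t ih =>
    intro p m h
    simp only [fam] at h
    rcases ht : fam t with _ | ⟨q, m'⟩ <;> simp only [ht] at h
    · simp only [Option.some.injEq, Prod.mk.injEq] at h
      rw [← h.2, ← h.1, PySem.List.index?_cons_self]
    · split_ifs at h with hx <;> simp only [Option.some.injEq, Prod.mk.injEq] at h
      · obtain ⟨h1, h2⟩ := h
        subst h1; subst h2
        rw [PySem.List.index?_cons_of_ne t (by omega : x ≠ m'), ih q m' ht]
        rfl
      · rw [← h.2, ← h.1, PySem.List.index?_cons_self]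

theorem fam_lt_length (gs : List Int) : ∀ (p : Nat) (m : Int), fam gs = some (p, m) →
    p < gs.length := by
  induction gs with
  | nil => intro p m h; simp [fam] at h
  | cons x t ih =>
    intro p m h
    simp only [fam] at h
    rcases ht : fam t with _ | ⟨q, m'⟩ <;> simp only [ht] at h <;>
      [skip; split_ifs at h] <;> simp only [Option.some.injEq, Prod.mk.injEq] at h <;>
      simp only [List.length_cons] <;> try omega
    have := ih q m' ht; omega

theorem fam_getD (gs : List Int) : ∀ (p : Nat) (m : Int), fam gs = some (p, m) →
    gs.getD p 0 = m := by
  induction gs with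
  | nil => intro p m h; simp [fam] at h
  | cons x t ih =>
    intro p m h
    simp only [fam] at h
    rcases ht : fam t with _ | ⟨q, m'⟩ <;> simp only [ht] at h <;>
      [skip; split_ifs at h] <;> simp only [Option.some.injEq, Prod.mk.injEq] at h
    · rw [← h.1, ← h.2]; rfl
    · rw [← h.1, ← h.2]; simpa using ih q m' ht
    · rw [← h.1, ← h.2]; rfl

theorem fam_max (gs : List Int) : ∀ (p : Nat) (m : Int), fam gs = some (p, m) →
    ∀ y ∈ gs, y ≤ m := by
  induction gs with
  | nil => intro p m h; simp [fam] at h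
  | cons x t ih =>
    intro p m h y hy
    simp only [fam] at h
    rcases ht : fam t with _ | ⟨q, m'⟩ <;> simp only [ht] at h
    · have ht' : t = [] := (fam_eq_none_iff t).mp ht
      subst ht'
      simp only [Option.some.injEq, Prod.mk.injEq] at h
      simp only [List.mem_cons, List.not_mem_nil, or_false] at hy
      subst hy; omega
    · split_ifs at h with hx <;> simp only [Option.some.injEq, Prod.mk.injEq] at h <;>
        rcases List.mem_cons.mp hy with rfl | hy
      · omega
      · have := ih q m' ht y hy; omega
      · omega
      · have := ih q m' ht y hy; omega

theorem fam_prefix_lt (gs : List Int) : ∀ (p : Nat) (m : Int), fam gs = some (p, m) →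
    ∀ j < p, gs.getD j 0 < m := by
  induction gs with
  | nil => intro p m h; simp [fam] at h
  | cons x t ih =>
    intro p m h j hj
    simp only [fam] at h
    rcases ht : fam t with _ | ⟨q, m'⟩ <;> simp only [ht] at h <;> [skip; split_ifs at h with hx] <;>
      simp only [Option.some.injEq, Prod.mk.injEq] at h
    · omega
    · obtain ⟨rfl, rfl⟩ : p = q + 1 ∧ m = m' := ⟨h.1.symm, h.2.symm⟩
      cases j with
      | zero => simpa using hx
      | succ j => simpa using ih q m ht j (by omega)
    · omega

theorem remove?_of_index? (gs : List Int) : ∀ (m : Int) (p : Nat),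
    PySem.List.index? gs m = some p → PySem.List.remove? gs m = some (gs.eraseIdx p) := by
  induction gs with
  | nil => intro m p h; rw [PySem.List.index?_eq_idxOf?] at h; simp at h
  | cons x t ih =>
    intro m p h
    by_cases hx : x = m
    · subst hx
      rw [PySem.List.index?_cons_self] at h
      obtain rfl : p = 0 := by simpa using h.symm
      simp [PySem.List.remove?_cons_self]
    · rw [PySem.List.index?_cons_of_ne t hx] at h
      rcases hq : PySem.List.index? t m with _ | q <;> rw [hq] at h <;> simp at h
      rw [PySem.List.remove?_cons_of_ne t hx, ih m q hq, ← h]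
      rfl

theorem selLoop_eq (tf : Int → List (List Int)) (f : Int → Int) :
    ∀ (k : Nat) (rem : List Int) (acc : List (List (List Int))),
      selLoop k (rem.map tf) (rem.map f) acc = acc ++ (idxExt f k rem).map tf := by
  intro k
  induction k with
  | zero => intro rem acc; simp [selLoop, idxExt]
  | succ k ih =>
    intro rem acc
    rcases hf : fam (rem.map f) with _ | ⟨p, m⟩
    · have hrem : rem = [] := by
        have := (fam_eq_none_iff _).mp hf
        simpa using this
      subst hrem
      simp [selLoop, idxExt, fam, PySem.List.max?]
    · have hp : p < rem.length := by
        have := fam_lt_length _ _ _ hf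
        simpa using this
      have hpm : p < (rem.map f).length := by simpa using hp
      have hpt : p < (rem.map tf).length := by simpa using hp
      have hidx : PySem.List.index? (rem.map f) m = some p := fam_index? _ _ _ hf
      show (match PySem.List.max? (rem.map f) (fun x => x) with
        | none => acc
        | some m => match PySem.List.index? (rem.map f) m with
          | none => acc
          | some maxIndex =>
            selLoop k
              (match PySem.List.pop? (rem.map tf) (maxIndex : Int) with | some r => r.2 | none => rem.map tf)
              (match PySem.List.remove? (rem.map f) m with | some l => l | none => rem.map f)
              (acc ++ [PySem.List.pyGetD (rem.map tf) (maxIndex : Int) []])) = _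
      rw [max?_eq_fam, hf]
      simp only [Option.map_some]
      simp only [hidx, remove?_of_index? _ _ _ hidx, PySem.List.pop?_natCast _ _ hpt,
        PySem.List.pyGetD_natCast, List.eraseIdx_map]
      rw [ih (rem.eraseIdx p) (acc ++ [(rem.map tf).getD p []])]
      simp only [idxExt, hf]
      rw [List.getD_eq_getElem _ _ hpt, List.getElem_map, ← List.getD_eq_getElem rem 0 hp]
      simp [List.append_assoc]

theorem pairwise_insertBy {α : Type} (lt : α → α → Bool)
    (asymm : ∀ a b, lt a b = true → lt b a = false)
    (trans : ∀ a b c, lt a b = true → lt b c = true → lt a c = true)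
    (x : α) (acc : List α) (hacc : acc.Pairwise (fun a b => lt b a = false)) :
    (PySem.List.insertBy lt x acc).Pairwise (fun a b => lt b a = false) := by
  induction acc with
  | nil => simp [PySem.List.insertBy]
  | cons y ys ih =>
    rcases List.pairwise_cons.mp hacc with ⟨hy, hys⟩
    simp only [PySem.List.insertBy]
    split
    · rename_i hxy
      refine List.pairwise_cons.mpr ⟨?_, hacc⟩
      intro z hz
      rcases List.mem_cons.mp hz with rfl | hz
      · exact asymm _ _ hxy
      · by_cases hzx : lt z x = true
        · have := trans _ _ _ hzx hxy
          rw [hy z hz] at this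
          exact absurd this (by simp)
        · simpa using hzx
    · rename_i hxy
      refine List.pairwise_cons.mpr ⟨?_, ih hys⟩
      intro z hz
      rcases (PySem.List.mem_insertBy lt x z ys).mp hz with rfl | hz
      · simpa using hxy
      · exact hy z hz

theorem pairwise_foldl_insertBy {α : Type} (lt : α → α → Bool)
    (asymm : ∀ a b, lt a b = true → lt b a = false)
    (trans : ∀ a b c, lt a b = true → lt b c = true → lt a c = true)
    (xs : List α) : ∀ (acc : List α), acc.Pairwise (fun a b => lt b a = false) →
    (xs.foldl (fun acc x => PySem.List.insertBy lt x acc) acc).Pairwise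
      (fun a b => lt b a = false) := by
  induction xs with
  | nil => intro acc hacc; simpa using hacc
  | cons x xs ih =>
    intro acc hacc
    exact ih _ (pairwise_insertBy lt asymm trans x acc hacc)

theorem idxExt_subset (f : Int → Int) :
    ∀ (k : Nat) (rem : List Int), ∀ y ∈ idxExt f k rem, y ∈ rem := by
  intro k
  induction k with
  | zero => intro rem y hy; simp [idxExt] at hy
  | succ k ih =>
    intro rem y hy
    rcases hf : fam (rem.map f) with _ | ⟨p, m⟩ <;> simp only [idxExt, hf] at hy
    · simp at hy
    · have hp : p < rem.length := by
        have := fam_lt_length _ _ _ hf; simpa using this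
      rcases List.mem_cons.mp hy with rfl | hy
      · rw [List.getD_eq_getElem rem 0 hp]; exact List.getElem_mem hp
      · exact (List.eraseIdx_sublist rem p).subset (ih _ y hy)

theorem idxExt_pairwise (f : Int → Int) (lt : Int → Int → Bool)
    (hlt : ∀ a b, lt a b = true ↔ (- f a < - f b ∨ (f a = f b ∧ a < b))) :
    ∀ (k : Nat) (rem : List Int), rem.Pairwise (· < ·) →
      (idxExt f k rem).Pairwise (fun a b => lt a b = true) := by
  intro k
  induction k with
  | zero => intro rem _; simp [idxExt]
  | succ k ih =>
    intro rem hrem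
    rcases hf : fam (rem.map f) with _ | ⟨p, m⟩ <;> simp only [idxExt, hf]
    · simp
    · have hp : p < rem.length := by
        have := fam_lt_length _ _ _ hf; simpa using this
      have hrem' : (rem.eraseIdx p).Pairwise (· < ·) :=
        List.Pairwise.sublist (List.eraseIdx_sublist rem p) hrem
      refine List.pairwise_cons.mpr ⟨?_, ih _ hrem'⟩
      intro y hy
      have hyrem' : y ∈ rem.eraseIdx p := idxExt_subset f k _ y hy
      have hfy : f y ≤ m := by
        have hyrem : y ∈ rem := (List.eraseIdx_sublist rem p).subset hyrem'
        exact fam_max _ _ _ hf (f y) (List.mem_map_of_mem hyrem)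
      have hhead : f (rem.getD p 0) = m := by
        have := fam_getD _ _ _ hf
        rw [List.getD_eq_getElem _ _ (by simpa using hp), List.getElem_map] at this
        rw [List.getD_eq_getElem _ _ hp]
        exact this
      rcases lt_or_eq_of_le hfy with hlt' | heq
      · rw [hlt]; left; omega
      · rw [hlt]; right
        refine ⟨by omega, ?_⟩
        rw [List.eraseIdx_eq_take_drop_succ] at hyrem'
        rcases List.mem_append.mp hyrem' with hy' | hy'
        · exfalso
          obtain ⟨j, hj, hyj⟩ := List.getElem_of_mem hy'
          have hjp : j < p := by
            have := List.length_take_le p rem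
            have h2 : j < (List.take p rem).length := hj
            simp at h2; omega
          have := fam_prefix_lt _ _ _ hf j hjp
          rw [List.getD_eq_getElem _ _ (by simpa using lt_trans hjp hp), List.getElem_map] at this
          rw [List.getElem_take] at hyj
          rw [hyj] at this
          omega
        · obtain ⟨j, hj, hyj⟩ := List.getElem_of_mem hy'
          rw [List.getElem_drop] at hyj
          have hlen : p + 1 + j < rem.length := by
            have := hj; simp [List.length_drop] at this; omega
          rw [List.getD_eq_getElem _ _ hp, ← hyj]
          exact List.pairwise_iff_getElem.mp hrem p (p + 1 + j) hp hlen (by omega)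

theorem idxExt_perm (f : Int → Int) :
    ∀ (n : Nat) (rem : List Int), rem.length = n → (idxExt f n rem).Perm rem := by
  intro n
  induction n with
  | zero =>
    intro rem h
    rw [List.length_eq_zero_iff] at h
    subst h; simp [idxExt]
  | succ n ih =>
    intro rem hlen
    rcases hf : fam (rem.map f) with _ | ⟨p, m⟩
    · exfalso
      have : rem = [] := by have := (fam_eq_none_iff _).mp hf; simpa using this
      subst this; simp at hlen
    · have hp : p < rem.length := by
        have := fam_lt_length _ _ _ hf; simpa using this
      simp only [idxExt, hf]
      have hlen' : (rem.eraseIdx p).length = n := by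
        rw [List.length_eraseIdx]; simp [hp]; omega
      rw [List.getD_eq_getElem rem 0 hp]
      exact ((ih _ hlen').cons _).trans (List.getElem_cons_eraseIdx_perm hp)

theorem sorted2_eq_idxExt (f : Int → Int) (R : List Int) (hR : R.Pairwise (· < ·)) :
    PySem.List.sorted2 R (fun k => -(f k)) (fun k => k) false = idxExt f R.length R := by
  have hlt : ∀ a b : Int, ((decide (-(f a) < -(f b)) || (!(decide (-(f b) < -(f a))) && decide (a < b)))
      = true) ↔ (- f a < - f b ∨ (f a = f b ∧ a < b)) := by
    intro a b
    simp only [Bool.or_eq_true, Bool.and_eq_true, Bool.not_eq_eq_eq_not, Bool.not_true,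
      decide_eq_true_eq, decide_eq_false_iff_not]
    constructor <;> intro h <;> omega
  set lt : Int → Int → Bool := fun a b =>
    (decide (-(f a) < -(f b)) || (!(decide (-(f b) < -(f a))) && decide (a < b))) with hltdef
  have asymm : ∀ a b, lt a b = true → lt b a = false := by
    intro a b h
    rw [hltdef] at *
    simp only [Bool.or_eq_true, Bool.and_eq_true, Bool.not_eq_eq_eq_not, Bool.not_true,
      decide_eq_true_eq, decide_eq_false_iff_not] at h ⊢
    simp only [Bool.or_eq_false_iff, Bool.and_eq_false_iff, Bool.not_eq_eq_eq_not, Bool.not_false,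
      decide_eq_false_iff_not, decide_eq_true_eq]
    omega
  have trans : ∀ a b c, lt a b = true → lt b c = true → lt a c = true := by
    intro a b c h1 h2
    rw [hltdef] at *
    simp only [Bool.or_eq_true, Bool.and_eq_true, Bool.not_eq_eq_eq_not, Bool.not_true,
      decide_eq_true_eq, decide_eq_false_iff_not] at h1 h2 ⊢
    omega
  have hdef : PySem.List.sorted2 R (fun k => -(f k)) (fun k => k) false
      = R.foldl (fun acc x => PySem.List.insertBy lt x acc) [] := rfl
  refine List.Perm.eq_of_pairwise (le := fun a b => lt b a = false) ?_ ?_ ?_ ?_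
  · intro a b _ _ h1 h2
    rw [hltdef] at h1 h2
    simp only [Bool.or_eq_false_iff, Bool.and_eq_false_iff, Bool.not_eq_eq_eq_not, Bool.not_false,
      decide_eq_false_iff_not, decide_eq_true_eq] at h1 h2
    omega
  · rw [hdef]
    exact pairwise_foldl_insertBy lt asymm trans R [] (by simp)
  · exact (idxExt_pairwise f lt hlt R.length R hR).imp (fun h => asymm _ _ h)
  · exact (PySem.List.sorted2_perm R _ _ false).trans (idxExt_perm f R.length R rfl).symm
-- ---- B's ranked insertion simulated by an insertion sort on indices ----
theorem insertRanked_sim (f : Int → Int) (tf : Int → List (List Int)) (t : Int) :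
    ∀ (accI : List Int),
    insertRanked (f t) (tf t) (accI.map (fun k => (f k, tf k)))
      = (PySem.List.insertBy (fun j k' => decide (f k' < f j)) t accI).map
          (fun k => (f k, tf k)) := by
  intro accI
  induction accI with
  | nil => rfl
  | cons q rest ih =>
    by_cases h : f q < f t
    · have h' : ¬ ((f q, tf q).1 ≥ f t) := by simpa using h
      simp only [List.map_cons, insertRanked, PySem.List.insertBy, if_neg h',
        if_pos (show decide (f q < f t) = true from by simpa using h)]
    · have h' : (f q, tf q).1 ≥ f t := by simpa using not_lt.mp h
      simp only [List.map_cons, insertRanked, PySem.List.insertBy, if_pos h',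
        if_neg (show ¬ decide (f q < f t) = true from by simpa using h), ih]

theorem ins_sim (f : Int → Int) (tf : Int → List (List Int)) :
    ∀ (idxs accI : List Int),
    idxs.foldl (fun acc k => insertRanked (f k) (tf k) acc)
        (accI.map (fun k => (f k, tf k)))
      = (idxs.foldl (fun a k => PySem.List.insertBy (fun j k' => decide (f k' < f j)) k a) accI).map
          (fun k => (f k, tf k)) := by
  intro idxs
  induction idxs with
  | nil => intro accI; rfl
  | cons t rest ih =>
    intro accI
    simp only [List.foldl_cons]
    rw [insertRanked_sim f tf t accI, ih]

theorem insertBy_congr {α : Type} (b1 b2 : α → α → Bool) (x : α) :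
    ∀ (l : List α), (∀ y ∈ l, b1 x y = b2 x y) →
      PySem.List.insertBy b1 x l = PySem.List.insertBy b2 x l := by
  intro l
  induction l with
  | nil => intro _; rfl
  | cons y ys ih =>
    intro h
    simp only [PySem.List.insertBy]
    rw [h y (by simp)]
    split
    · rfl
    · rw [ih (fun z hz => h z (by simp [hz]))]

theorem foldl_insertBy_congr (f : Int → Int) :
    ∀ (l acc : List Int), l.Pairwise (· < ·) → (∀ x ∈ l, ∀ y ∈ acc, y < x) →
      l.foldl (fun a k => PySem.List.insertBy (fun j k' => decide (f k' < f j)) k a) acc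
        = l.foldl (fun a k => PySem.List.insertBy (fun a b =>
            (decide (-(f a) < -(f b)) || (!(decide (-(f b) < -(f a))) && decide (a < b)))) k a) acc := by
  intro l
  induction l with
  | nil => intro acc _ _; rfl
  | cons x rest ih =>
    intro acc hpw hacc
    rcases List.pairwise_cons.mp hpw with ⟨hx, hrest⟩
    simp only [List.foldl_cons]
    rw [insertBy_congr (fun j k' => decide (f k' < f j))
      (fun a b => (decide (-(f a) < -(f b)) || (!(decide (-(f b) < -(f a))) && decide (a < b))))
      x acc (fun y hy => by
      show decide (f y < f x)
        = (decide (-(f x) < -(f y)) || (!(decide (-(f y) < -(f x))) && decide (x < y)))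
      have hyx : y < x := hacc x (by simp) y hy
      have hd1 : decide ((-(f x) : Int) < -(f y)) = decide (f y < f x) :=
        decide_eq_decide.mpr (by omega)
      have hd2 : decide (x < y) = false := decide_eq_false (by omega)
      rw [hd1, hd2, Bool.and_false, Bool.or_false])]
    apply ih _ hrest
    intro z hz y hy
    rcases (PySem.List.mem_insertBy _ x y acc).mp hy with rfl | hy
    · exact hx z hz
    · exact lt_trans (hacc x (by simp) y hy) (hx z hz)

-- ---- selection sort (A's loop) = stable descending insertion (B's loop) ----
theorem sel_eq_ins (G : List (List Int) → Int) (cs : List (List (List Int))) :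
    selLoop (cs.map G).length cs (cs.map G) []
      = (cs.foldl (fun acc b => insertRanked (G b) b acc) []).map (·.2) := by
  set gs : List Int := cs.map G with hgs
  set R : List Int := PySem.List.pyRange 0 (cs.length : Int) 1 with hRdef
  set f : Int → Int := fun k => PySem.List.pyGetD gs k 0 with hf
  set tf : Int → List (List Int) := fun k => PySem.List.pyGetD cs k [] with htf
  have hlen : (cs.length : Int) = (gs.length : Int) := by simp [hgs]
  have htemp : R.map tf = cs := PySem.List.map_pyGetD_pyRange_zero cs []
  have hgr : R.map f = gs := by
    rw [hRdef, hlen]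
    exact PySem.List.map_pyGetD_pyRange_zero gs 0
  have hR : R.Pairwise (· < ·) := by
    rw [hRdef, show ((cs.length : Int)) = ((cs.length : Nat) : Int) from rfl,
      PySem.List.pyRange_zero_natCast]
    exact List.Pairwise.map _ (fun a b h => by exact_mod_cast h) List.pairwise_lt_range
  have hRlen : R.length = gs.length := by rw [← hgr]; simp
  have hGtf : ∀ k ∈ R, G (tf k) = f k := by
    intro k hk
    have : k ∈ (List.range cs.length).map (fun t : Nat => (t : Int)) := by
      rw [← PySem.List.pyRange_zero_natCast]
      exact hRdef ▸ hk
    obtain ⟨t, ht, rfl⟩ := List.mem_map.mp this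
    have ht' : t < cs.length := List.mem_range.mp ht
    rw [htf, hf]
    simp only [PySem.List.pyGetD_natCast]
    rw [List.getD_eq_getElem _ _ ht', List.getD_eq_getElem _ _ (by simpa [hgs] using ht')]
    simp [hgs]
  calc selLoop gs.length cs gs []
      = selLoop gs.length (R.map tf) (R.map f) [] := by rw [htemp, hgr]
    _ = (idxExt f gs.length R).map tf := selLoop_eq tf f gs.length R []
    _ = (cs.foldl (fun acc b => insertRanked (G b) b acc) []).map (·.2) := by
        rw [← htemp, List.foldl_map]
        rw [PySem.List.foldl_congr_mem' _ _
          (fun acc k => insertRanked (f k) (tf k) acc) _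
          (fun k hk acc => by rw [hGtf k hk])]
        have h0 : ([] : List (Int × List (List Int))) = ([] : List Int).map (fun k => (f k, tf k)) := rfl
        rw [h0, ins_sim f tf R []]
        rw [foldl_insertBy_congr f R [] hR (by simp)]
        rw [show (R.foldl (fun a k => PySem.List.insertBy (fun a b =>
            (decide (-(f a) < -(f b)) || (!(decide (-(f b) < -(f a))) && decide (a < b)))) k a) [])
          = PySem.List.sorted2 R (fun k => -(f k)) (fun k => k) false from rfl]
        rw [sorted2_eq_idxExt f R hR, hRlen]
        rw [List.map_map]
        rfl
theorem foldl_pushm (sit : List (List Int)) :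
    ∀ (ms : List Int) (acc : List (List (List Int)) × List Int),
    ms.foldl (fun acc i =>
        match NextSit sit i with
        | some nxt => (acc.1 ++ [nxt], acc.2 ++ [Grade nxt])
        | none => acc) acc
      = (acc.1 ++ (ms.map (fun m => NextSit sit m)).filterMap id,
         acc.2 ++ ((ms.map (fun m => NextSit sit m)).filterMap id).map Grade) := by
  intro ms
  induction ms with
  | nil => intro acc; simp
  | cons m t ih =>
    intro acc
    cases h : NextSit sit m <;> simp [h, ih]

theorem foldl_insb : ∀ (os : List (Option (List (List Int)))) (acc : List (Int × List (List Int))),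
    os.foldl (fun acc o =>
        match o with
        | some b => insertRanked (manhattan b) b acc
        | none => acc) acc
      = (os.filterMap id).foldl (fun acc b => insertRanked (manhattan b) b acc) acc := by
  intro os
  induction os with
  | nil => intro acc; rfl
  | cons o t ih => intro acc; cases o <;> simp [ih]

theorem step_match (C : Prop) [Decidable C] (bd : List (List Int))
    (acc : List (Int × List (List Int))) :
    (if C then insertRanked (manhattan bd) bd acc else acc)
      = match (if C then some bd else none) with
        | some b => insertRanked (manhattan b) b acc | none => acc := by
  by_cases h : C <;> simp [h]

theorem main_eq (sit : List (List Int)) (hPre : Pre_Appritiation sit) :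
    Appritiation sit = Appritiation_alt sit := by
  obtain ⟨h3, _, hz⟩ := hPre
  obtain ⟨k, hk⟩ := Option.isSome_iff_exists.mp (zeroIdx_isSome sit h3 hz)
  have hk9 : k < 9 := by
    unfold zeroIdx at hk
    exact List.mem_range.mp (List.mem_of_find?_eq_some hk)
  have hFZ : FindZero sit = some (((k / 3 : Nat) : Int), ((k % 3 : Nat) : Int)) := by
    rw [FindZero_eq, hk]
    rfl
  have e1 := NextSit_move sit (k / 3) (k % 3) hFZ (-1) 0 1 (dict_move1 (k / 3) (k % 3))
  have e2 := NextSit_move sit (k / 3) (k % 3) hFZ 1 0 2 (dict_move2 (k / 3) (k % 3))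
  have e3 := NextSit_move sit (k / 3) (k % 3) hFZ 0 (-1) 3 (dict_move3 (k / 3) (k % 3))
  have e4 := NextSit_move sit (k / 3) (k % 3) hFZ 0 1 4 (dict_move4 (k / 3) (k % 3))
  have hr : PySem.List.pyRange 1 5 1 = [(1 : Int), 2, 3, 4] := by decide
  simp only [Appritiation, hr]
  rw [foldl_pushm sit [(1 : Int), 2, 3, 4] ([], [])]
  simp only [List.map_cons, List.map_nil, List.nil_append]
  simp only [Appritiation_alt, hk]
  simp only [List.foldl_cons, List.foldl_nil]
  rw [step_match, step_match, step_match, step_match, ← e1, ← e2, ← e3, ← e4]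
  have hB := foldl_insb [NextSit sit 1, NextSit sit 2, NextSit sit 3, NextSit sit 4] []
  simp only [List.foldl_cons, List.foldl_nil] at hB
  rw [hB]
  rw [PySem.List.foldl_congr_mem'
    ([NextSit sit 1, NextSit sit 2, NextSit sit 3, NextSit sit 4].filterMap id)
    (fun acc b => insertRanked (manhattan b) b acc)
    (fun acc b => insertRanked (Grade b) b acc) []
    (fun b _ acc => by
      show insertRanked (manhattan b) b acc = insertRanked (Grade b) b acc
      rw [Grade_eq_manhattan])]
  exact sel_eq_ins Grade ([NextSit sit 1, NextSit sit 2, NextSit sit 3, NextSit sit 4].filterMap id)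

-- ===== VERDICT (by name: the statement is the Claim_ definition above) =====
theorem Appritiation_spec : Claim_equal_Appritiation := by
  intro sit _ hPre
  exact main_eq sit hPre
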